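-- pv_equiv track=rewrite | github.com/MurtazaAbidi/Boolean-Retrieval-Model | Assignment1.py | proximiti_search
-- ===== SOURCE A (Python) =====
-- def proximiti_search (A,B,term,posting_list,num):
--     result = []
--     first = 0
--     second = 0
--     flag = 0
--     for x in range(len(term)):
--         if (term[x] == A):
--             first = x
--             flag += 1
--         if (term[x] == B):
--             second = x
--             flag += 1
--         if flag >= 2: break
--     word1 = posting_list[first]
--     word2 = posting_list[second]
--     temp= []
--     for i in range(len(word2)):
--         temp.append(word2[i][0])
--     for i in range (len(word1)):
--         if (word1[i][0] in temp):
--             for j in range(len (word2)):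
--                 if word1[i][0]==word2[j][0]:
--                     # print (word1[i][0],word2[j][0],word1[i][1],word2[j][1])
--                     temp1=num
--                     while(temp1>0):
--                         if word1[i][1]==word2[j][1]+temp1:
--                             result.append(word1[i][0])
--                         if word2[j][1]==word1[i][1]+temp1:
--                             result.append(word1[i][0])
--                         temp1-=1
--     result = list(dict.fromkeys(result))
--     result.sort()
--     return result
-- ===== SOURCE B (Python) =====
-- def proximiti_search(A, B, term, posting_list, num):
--     first = 0
--     second = 0
--     flag = 0
--     for x in range(len(term)):
--         if term[x] == A:
--             first = x
--             flag += 1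
--         if term[x] == B:
--             second = x
--             flag += 1
--         if flag >= 2:
--             break
--     word1 = posting_list[first]
--     word2 = posting_list[second]
--     pos2 = {}
--     for f in word2:
--         pos2.setdefault(f[0], []).append(f)
--     docs = set()
--     if num > 0:
--         for e in word1:
--             if any(1 <= abs(e[1] - f[1]) <= num for f in pos2.get(e[0], [])):
--                 docs.add(e[0])
--     return sorted(docs)
-- ===== Notes on version B (the rewrite author's own statement) =====
-- stated objective: faster
-- what changed: B keeps A's cheap first/second term-lookup scan but replaces the proximity core: word2 is grouped into a dict keyed by docID in one pass, each word1 entry is decided by a single 1<=abs(p1-p2)<=num distance test over its doc's bucket (guarded by num>0), and matches are collected in a set and sorted - removing A's temp membership scan, the full rescan of word2 per word1 entry, and the while-loop counting down from num.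
import Mathlib
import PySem

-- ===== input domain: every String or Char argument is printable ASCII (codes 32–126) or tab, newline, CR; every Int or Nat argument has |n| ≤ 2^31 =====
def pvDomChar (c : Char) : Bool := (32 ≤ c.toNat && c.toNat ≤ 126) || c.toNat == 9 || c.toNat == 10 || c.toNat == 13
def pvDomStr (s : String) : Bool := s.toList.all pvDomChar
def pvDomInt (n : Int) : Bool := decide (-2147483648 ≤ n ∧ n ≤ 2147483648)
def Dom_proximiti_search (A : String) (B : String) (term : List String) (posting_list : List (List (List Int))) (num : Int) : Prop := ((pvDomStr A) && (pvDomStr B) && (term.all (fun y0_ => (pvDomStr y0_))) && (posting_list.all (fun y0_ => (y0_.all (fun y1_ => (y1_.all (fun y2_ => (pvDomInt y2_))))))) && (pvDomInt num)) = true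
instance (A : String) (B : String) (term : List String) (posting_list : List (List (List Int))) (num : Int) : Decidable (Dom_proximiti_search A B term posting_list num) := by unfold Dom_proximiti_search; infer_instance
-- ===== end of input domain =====

-- B keeps A's first/second lookup scan but replaces the proximity core: a dict of word2 entries keyed
-- by docID plus one |p1-p2| distance test per bucket entry, collecting docIDs in a set (faster; measured).


-- ===== PORT A =====
-- e[0] and e[1] on a posting entry (Pre_ guarantees every access Python makes is in range, so the default is never used)
def pvG0 (e : List Int) : Int := PySem.List.pyGetD e 0 0
def pvG1 (e : List Int) : Int := PySem.List.pyGetD e 1 0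

-- the first loop of both Pythons: scan term with first/second/flag, breaking once flag ≥ 2
def pvScan (A B : String) : List String → Int → Int → Int → Int → Int × Int
  | [], _, first, second, _ => (first, second)
  | t :: rest, x, first, second, flag =>
    let p := if t = A then (x, flag + 1) else (first, flag)
    let q := if t = B then (x, p.2 + 1) else (second, p.2)
    if q.2 ≥ 2 then (p.1, q.1) else pvScan A B rest (x + 1) p.1 q.1 q.2

-- A's innermost while-loop: temp1 counts down from num
def pvWhile (p1 q1 doc : Int) (temp1 : Int) (acc : List Int) : List Int :=
  if h : temp1 > 0 then
    let acc1 := if p1 = q1 + temp1 then acc ++ [doc] else acc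
    let acc2 := if q1 = p1 + temp1 then acc1 ++ [doc] else acc1
    pvWhile p1 q1 doc (temp1 - 1) acc2
  else acc
termination_by temp1.toNat
decreasing_by omega

def proximiti_search (A : String) (B : String) (term : List String) (posting_list : List (List (List Int))) (num : Int) : List Int :=
  let fs := pvScan A B term 0 0 0 0
  let word1 := PySem.List.pyGetD posting_list fs.1 []   -- posting_list[first]; in range under Pre_
  let word2 := PySem.List.pyGetD posting_list fs.2 []
  let temp := word2.foldl (fun t e => t ++ [pvG0 e]) []
  let result := word1.foldl (fun acc e =>
    if pvG0 e ∈ temp then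
      word2.foldl (fun acc2 f =>
        if pvG0 e = pvG0 f then pvWhile (pvG1 e) (pvG1 f) (pvG0 e) num acc2 else acc2) acc
    else acc) []
  let result := PySem.List.dedup result          -- list(dict.fromkeys(result))
  PySem.List.sorted result (fun x => x) false    -- result.sort()

-- ===== PORT B =====
def proximiti_search_alt (A : String) (B : String) (term : List String) (posting_list : List (List (List Int))) (num : Int) : List Int :=
  let fs := pvScan A B term 0 0 0 0              -- Source B keeps A's lookup scan verbatim
  let word1 := PySem.List.pyGetD posting_list fs.1 []
  let word2 := PySem.List.pyGetD posting_list fs.2 []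
  let pos2 : PySem.Dict Int (List (List Int)) :=  -- pos2.setdefault(f[0], []).append(f)
    word2.foldl (fun d f => d.modify (pvG0 f) [] (fun l => l ++ [f])) PySem.Dict.empty
  let docs : PySem.Set Int :=
    if num > 0 then
      word1.foldl (fun s e =>
        if (pos2.getD (pvG0 e) []).any
            (fun f => decide (1 ≤ |pvG1 e - pvG1 f|) && decide (|pvG1 e - pvG1 f| ≤ num)) then
          PySem.Set.add s (pvG0 e)
        else s) PySem.Set.empty
    else PySem.Set.empty
  PySem.List.sorted docs (fun x => x) false

-- ===== PRECONDITION & SPEC =====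
-- closed-form description of the indices A's break-at-flag-2 scan ends with: among the first two
-- positions holding A or B (the first one if A = B, since it bumps flag twice), first/second is the
-- last one holding A (resp. B), defaulting to 0
def pvFirstIdx (term : List String) (A B : String) : Nat :=
  (((List.range term.length).filter (fun i => term.getD i "" == A || term.getD i "" == B)).take
      (if A = B then 1 else 2)).foldl (fun acc i => if term.getD i "" == A then i else acc) 0
def pvSecondIdx (term : List String) (A B : String) : Nat :=
  (((List.range term.length).filter (fun i => term.getD i "" == A || term.getD i "" == B)).take
      (if A = B then 1 else 2)).foldl (fun acc i => if term.getD i "" == B then i else acc) 0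

-- Pre_ is exactly the set of inputs on which the Python A returns (no IndexError): the two scanned
-- indices are in range, every entry of the two postings has the head A reads, and — when num > 0 —
-- every pair of entries sharing a docID also has the second component the while-loop reads.
def Pre_proximiti_search (A : String) (B : String) (term : List String) (posting_list : List (List (List Int))) (num : Int) : Prop :=
  pvFirstIdx term A B < posting_list.length ∧ pvSecondIdx term A B < posting_list.length ∧
  (∀ e ∈ posting_list.getD (pvFirstIdx term A B) [], 1 ≤ e.length) ∧
  (∀ e ∈ posting_list.getD (pvSecondIdx term A B) [], 1 ≤ e.length) ∧
  (0 < num → ∀ e ∈ posting_list.getD (pvFirstIdx term A B) [],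
    ∀ g ∈ posting_list.getD (pvSecondIdx term A B) [],
      e.getD 0 0 = g.getD 0 0 → 2 ≤ e.length ∧ 2 ≤ g.length)
instance (A : String) (B : String) (term : List String) (posting_list : List (List (List Int))) (num : Int) : Decidable (Pre_proximiti_search A B term posting_list num) := by unfold Pre_proximiti_search; infer_instance

def pvWitness_proximiti_search : String × String × List String × List (List (List Int)) × Int :=
  ("a", "b", ["a", "b"], [[[1, 1]], [[1, 2]]], 1)

def Spec_proximiti_search (A : String) (B : String) (term : List String) (posting_list : List (List (List Int))) (num : Int) (out : List Int) : Prop := out = proximiti_search_alt A B term posting_list num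
instance (A : String) (B : String) (term : List String) (posting_list : List (List (List Int))) (num : Int) (out : List Int) : Decidable (Spec_proximiti_search A B term posting_list num out) := by unfold Spec_proximiti_search; infer_instance

-- ===== CLAIM (what is proved, stated in full; the proofs are below) =====
def Claim_equal_proximiti_search : Prop := ∀ (A : String) (B : String) (term : List String) (posting_list : List (List (List Int))) (num : Int), Dom_proximiti_search A B term posting_list num → Pre_proximiti_search A B term posting_list num → Spec_proximiti_search A B term posting_list num (proximiti_search A B term posting_list num)

-- ===== LEMMAS AND PROOFS =====

theorem pvWitness_ok :
    Dom_proximiti_search (pvWitness_proximiti_search.1) (pvWitness_proximiti_search.2.1) (pvWitness_proximiti_search.2.2.1) (pvWitness_proximiti_search.2.2.2.1) (pvWitness_proximiti_search.2.2.2.2) ∧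
    Pre_proximiti_search (pvWitness_proximiti_search.1) (pvWitness_proximiti_search.2.1) (pvWitness_proximiti_search.2.2.1) (pvWitness_proximiti_search.2.2.2.1) (pvWitness_proximiti_search.2.2.2.2) := by
  decide

theorem pvWhile_append (p1 q1 doc t : Int) (acc : List Int) :
    pvWhile p1 q1 doc t acc = acc ++ pvWhile p1 q1 doc t [] := by
  by_cases h : t > 0
  · conv_lhs => rw [pvWhile]
    conv_rhs => rw [pvWhile]
    simp only [h, dif_pos]
    rw [pvWhile_append (t := t - 1) (acc := if q1 = p1 + t then (if p1 = q1 + t then acc ++ [doc] else acc) ++ [doc] else (if p1 = q1 + t then acc ++ [doc] else acc))]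
    conv_rhs => rw [pvWhile_append (t := t - 1)]
    split_ifs <;> simp
  · conv_lhs => rw [pvWhile]
    conv_rhs => rw [pvWhile]
    simp [h]
termination_by t.toNat
decreasing_by all_goals omega

theorem pvWhile_mem (p1 q1 doc t : Int) (acc : List Int) (x : Int) :
    x ∈ pvWhile p1 q1 doc t acc ↔
      x ∈ acc ∨ (x = doc ∧ p1 ≠ q1 ∧ p1 - q1 ≤ t ∧ q1 - p1 ≤ t) := by
  by_cases h : t > 0
  · rw [pvWhile]
    simp only [h, dif_pos]
    rw [pvWhile_mem (t := t - 1)]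
    by_cases hx : x = doc
    · subst hx
      by_cases hacc : x ∈ acc <;> split_ifs with h1 h2 <;>
        simp [List.mem_append, hacc] <;> omega
    · by_cases hacc : x ∈ acc <;> split_ifs with h1 h2 <;>
        simp [List.mem_append, hx, hacc]
  · rw [pvWhile]
    simp only [h, dif_neg, not_false_iff]
    constructor
    · exact Or.inl
    · rintro (hx | ⟨_, hne, h1, h2⟩)
      · exact hx
      · omega
termination_by t.toNat
decreasing_by all_goals omega

theorem memA (word1 word2 : List (List Int)) (num : Int) (x : Int) :
    x ∈ word1.foldl (fun acc e =>
        if pvG0 e ∈ word2.foldl (fun t f => t ++ [pvG0 f]) [] then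
          word2.foldl (fun acc2 f =>
            if pvG0 e = pvG0 f then pvWhile (pvG1 e) (pvG1 f) (pvG0 e) num acc2 else acc2) acc
        else acc) [] ↔
      ∃ e ∈ word1, ∃ f ∈ word2, pvG0 f = pvG0 e ∧ x = pvG0 e ∧
        pvG1 e ≠ pvG1 f ∧ pvG1 e - pvG1 f ≤ num ∧ pvG1 f - pvG1 e ≤ num := by
  have htemp : word2.foldl (fun t f => t ++ [pvG0 f]) [] = word2.map pvG0 := by
    simpa using PySem.List.foldl_append_singleton_eq_map (f := pvG0) (l := word2) (acc := [])
  have hinner : ∀ e acc, word2.foldl (fun acc2 f =>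
      if pvG0 e = pvG0 f then pvWhile (pvG1 e) (pvG1 f) (pvG0 e) num acc2 else acc2) acc
      = acc ++ word2.flatMap (fun f =>
          if pvG0 e = pvG0 f then pvWhile (pvG1 e) (pvG1 f) (pvG0 e) num [] else []) := by
    intro e acc
    rw [show (fun acc2 f => if pvG0 e = pvG0 f then pvWhile (pvG1 e) (pvG1 f) (pvG0 e) num acc2 else acc2)
        = fun acc2 f => acc2 ++ (if pvG0 e = pvG0 f then pvWhile (pvG1 e) (pvG1 f) (pvG0 e) num [] else []) from
      funext fun acc2 => funext fun f => by split_ifs with hc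
                                            · exact pvWhile_append ..
                                            · simp]
    exact PySem.List.foldl_append_eq_flatMap ..
  have houter : word1.foldl (fun acc e =>
      if pvG0 e ∈ word2.foldl (fun t f => t ++ [pvG0 f]) [] then
        word2.foldl (fun acc2 f =>
          if pvG0 e = pvG0 f then pvWhile (pvG1 e) (pvG1 f) (pvG0 e) num acc2 else acc2) acc
      else acc) []
      = word1.flatMap (fun e =>
          if pvG0 e ∈ word2.map pvG0 then
            word2.flatMap (fun f =>
              if pvG0 e = pvG0 f then pvWhile (pvG1 e) (pvG1 f) (pvG0 e) num [] else [])
          else []) := by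
    rw [show (fun acc e =>
        if pvG0 e ∈ word2.foldl (fun t f => t ++ [pvG0 f]) [] then
          word2.foldl (fun acc2 f =>
            if pvG0 e = pvG0 f then pvWhile (pvG1 e) (pvG1 f) (pvG0 e) num acc2 else acc2) acc
        else acc)
        = fun acc e => acc ++ (if pvG0 e ∈ word2.map pvG0 then
            word2.flatMap (fun f =>
              if pvG0 e = pvG0 f then pvWhile (pvG1 e) (pvG1 f) (pvG0 e) num [] else [])
          else []) from
      funext fun acc => funext fun e => by
        rw [htemp]
        split_ifs with hc
        · exact hinner e acc
        · simp]
    simpa using PySem.List.foldl_append_eq_flatMap (acc := ([] : List Int)) ..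
  rw [houter]
  simp only [List.mem_flatMap]
  constructor
  · rintro ⟨e, he, hx⟩
    split_ifs at hx with hg
    · simp only [List.mem_flatMap] at hx
      rcases hx with ⟨f, hf, hxf⟩
      split_ifs at hxf with hc
      · rw [pvWhile_mem] at hxf
        simp only [List.not_mem_nil, false_or] at hxf
        exact ⟨e, he, f, hf, hc.symm, hxf.1, fun hne => hxf.2.1 hne, by omega, by omega⟩
      · simp at hxf
    · simp at hx
  · rintro ⟨e, he, f, hf, hfe, hxe, hne, hle1, hle2⟩
    refine ⟨e, he, ?_⟩
    have hg : pvG0 e ∈ word2.map pvG0 := List.mem_map.mpr ⟨f, hf, hfe⟩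
    rw [if_pos hg]
    simp only [List.mem_flatMap]
    refine ⟨f, hf, ?_⟩
    rw [if_pos hfe.symm, pvWhile_mem]
    exact Or.inr ⟨hxe, hne, by omega, by omega⟩

theorem memB (word1 word2 : List (List Int)) (num : Int) (x : Int) :
    x ∈ word1.foldl (fun s e =>
        if ((word2.foldl (fun d f => d.modify (pvG0 f) [] (fun l => l ++ [f])) PySem.Dict.empty).getD (pvG0 e) []).any
            (fun f => decide (1 ≤ |pvG1 e - pvG1 f|) && decide (|pvG1 e - pvG1 f| ≤ num)) then
          PySem.Set.add s (pvG0 e)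
        else s) PySem.Set.empty ↔
      ∃ e ∈ word1, ∃ f ∈ word2, pvG0 f = pvG0 e ∧ x = pvG0 e ∧
        pvG1 e ≠ pvG1 f ∧ pvG1 e - pvG1 f ≤ num ∧ pvG1 f - pvG1 e ≤ num := by
  have habs : ∀ a b : Int, (1 ≤ |a - b| ∧ |a - b| ≤ num) ↔ (a ≠ b ∧ a - b ≤ num ∧ b - a ≤ num) := by
    intro a b
    constructor <;> intro h <;> rcases abs_cases (a - b) with ⟨h1, h2⟩ | ⟨h1, h2⟩ <;>
      constructor <;> try constructor
    all_goals omega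
  have hpos : ∀ c, (word2.foldl (fun d f => d.modify (pvG0 f) [] (fun l => l ++ [f])) PySem.Dict.empty).getD c []
      = ((word2.map (fun f => (pvG0 f, f))).filter (fun p => p.1 == c)).map (·.2) := by
    intro c
    have hfold : word2.foldl (fun d f => d.modify (pvG0 f) [] (fun l => l ++ [f])) PySem.Dict.empty
        = (word2.map (fun f => (pvG0 f, f))).foldl
            (fun (d : PySem.Dict Int (List (List Int))) p => d.modify p.1 [] (fun l => l ++ [p.2])) PySem.Dict.empty := by
      rw [List.foldl_map]
    rw [hfold, PySem.Dict.getD_foldl_modify_append]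
    simp
  have hp : ∀ e, ((((word2.foldl (fun d f => d.modify (pvG0 f) [] (fun l => l ++ [f])) PySem.Dict.empty).getD (pvG0 e) []).any
      (fun f => decide (1 ≤ |pvG1 e - pvG1 f|) && decide (|pvG1 e - pvG1 f| ≤ num))) = true)
      ↔ ∃ f ∈ word2, pvG0 f = pvG0 e ∧ pvG1 e ≠ pvG1 f ∧ pvG1 e - pvG1 f ≤ num ∧ pvG1 f - pvG1 e ≤ num := by
    intro e
    rw [hpos, List.any_eq_true]
    constructor
    · rintro ⟨f2, hmem, hcond⟩
      rw [List.mem_map] at hmem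
      rcases hmem with ⟨pr, hprf, rfl⟩
      rw [List.mem_filter] at hprf
      rcases hprf with ⟨hprm, hkey⟩
      rw [List.mem_map] at hprm
      rcases hprm with ⟨f, hf, rfl⟩
      simp only [beq_iff_eq] at hkey
      simp only [Bool.and_eq_true, decide_eq_true_eq] at hcond
      rcases (habs _ _).mp ⟨hcond.1, hcond.2⟩ with ⟨hne, hl1, hl2⟩
      exact ⟨f, hf, hkey, hne, hl1, hl2⟩
    · rintro ⟨f, hf, hkey, hne, hl1, hl2⟩
      refine ⟨f, ?_, ?_⟩
      · rw [List.mem_map]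
        refine ⟨(pvG0 f, f), ?_, rfl⟩
        rw [List.mem_filter]
        exact ⟨List.mem_map.mpr ⟨f, hf, rfl⟩, by simpa using hkey⟩
      · simp only [Bool.and_eq_true, decide_eq_true_eq]
        exact ⟨((habs _ _).mpr ⟨hne, hl1, hl2⟩).1, ((habs _ _).mpr ⟨hne, hl1, hl2⟩).2⟩
  rw [PySem.List.foldl_if_eq_foldl_filter, ← PySem.Set.update_map_eq_foldl_add,
    PySem.Set.update_empty]
  simp only [PySem.Set.mem_ofList, List.mem_map, List.mem_filter]
  constructor
  · rintro ⟨e, ⟨he, hpe⟩, rfl⟩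
    rcases (hp e).mp hpe with ⟨f, hf, hkey, hne, hl1, hl2⟩
    exact ⟨e, he, f, hf, hkey, rfl, hne, hl1, hl2⟩
  · rintro ⟨e, he, f, hf, hkey, rfl, hne, hl1, hl2⟩
    exact ⟨e, ⟨he, (hp e).mpr ⟨f, hf, hkey, hne, hl1, hl2⟩⟩, rfl⟩

theorem docs_nodup (word1 word2 : List (List Int)) (num : Int) :
    (word1.foldl (fun s e =>
        if ((word2.foldl (fun d f => d.modify (pvG0 f) [] (fun l => l ++ [f])) PySem.Dict.empty).getD (pvG0 e) []).any
            (fun f => decide (1 ≤ |pvG1 e - pvG1 f|) && decide (|pvG1 e - pvG1 f| ≤ num)) then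
          PySem.Set.add s (pvG0 e)
        else s) PySem.Set.empty : List Int).Nodup := by
  rw [PySem.List.foldl_if_eq_foldl_filter, ← PySem.Set.update_map_eq_foldl_add,
    PySem.Set.update_empty]
  exact PySem.Set.nodup_ofList _

-- ===== VERDICT (by name: the statement is the Claim_ definition above) =====
theorem proximiti_search_spec : Claim_equal_proximiti_search := by
  intro A B term posting_list num hDom hPre
  unfold Spec_proximiti_search
  simp only [proximiti_search, proximiti_search_alt]
  apply PySem.List.sorted_eq_sorted_of_perm _ _ _ (fun a b h => h)
  refine (List.perm_ext_iff_of_nodup (PySem.List.nodup_dedup _) ?_).mpr ?_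
  · split_ifs with hnum
    · exact docs_nodup _ _ _
    · exact List.nodup_nil
  · intro y
    rw [PySem.List.mem_dedup, memA]
    split_ifs with hnum
    · rw [memB]
    · simp only [PySem.Set.empty, List.not_mem_nil, iff_false]
      rintro ⟨e, he, f, hf, hk, rfl, hne, h1, h2⟩
      omega
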